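-- pv_equiv track=rewrite | github.com/hyunjimoon/tolzul | Front/On/love(cs)/strategic_ambiguity/empirics/src/transportation_segmentation.py | detect_tech_stack
-- ===== SOURCE A (Python) =====
-- def detect_tech_stack(description: str, keywords: str = '', promise: str = '') -> str:
--     """
--     Classify technology stack based on pivoting cost.
--
--     Returns:
--         'Software', 'Fleet', 'Infrastructure', or 'Mixed'
--     """
--     text = f"{description} {keywords} {promise}".lower()
--
--     # Software (low pivoting cost)
--     software_keywords = [
--         'saas', 'software', 'app', 'application', 'platform',
--         'api', 'cloud', 'algorithm', 'ai', 'machine learning',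
--         'data analytics', 'routing', 'optimization software',
--         'mobile app', 'web platform', 'ota update'
--     ]
--
--     # Fleet (medium pivoting cost)
--     fleet_keywords = [
--         'vehicle', 'car', 'truck', 'bus', 'scooter', 'bike',
--         'autonomous vehicle', 'self-driving', 'electric vehicle',
--         'fleet', 'ride-sharing vehicle', 'micromobility',
--         'drone delivery', 'delivery robot'
--     ]
--
--     # Infrastructure (high pivoting cost)
--     infra_keywords = [
--         'infrastructure', 'charging station', 'charging network',
--         'highway', 'rail', 'track', 'station', 'terminal',
--         'parking', 'garage', 'depot', 'hub', 'facility',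
--         'hyperloop', 'tunnel', 'bridge', 'port'
--     ]
--
--     # Count matches
--     software_count = sum(1 for kw in software_keywords if kw in text)
--     fleet_count = sum(1 for kw in fleet_keywords if kw in text)
--     infra_count = sum(1 for kw in infra_keywords if kw in text)
--
--     # Decision logic
--     total = software_count + fleet_count + infra_count
--
--     if total == 0:
--         return 'Unknown'
--
--     # If multiple types detected
--     if sum([software_count > 0, fleet_count > 0, infra_count > 0]) >= 2:
--         return 'Mixed'
--
--     # Single dominant type
--     if infra_count > 0:
--         return 'Infrastructure'
--     elif fleet_count > 0:
--         return 'Fleet'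
--     elif software_count > 0:
--         return 'Software'
--     else:
--         return 'Unknown'
-- ===== SOURCE B (Python) =====
-- SOFTWARE_KEYWORDS = [
--     'saas', 'software', 'app', 'application', 'platform',
--     'api', 'cloud', 'algorithm', 'ai', 'machine learning',
--     'data analytics', 'routing', 'optimization software',
--     'mobile app', 'web platform', 'ota update'
-- ]
--
-- FLEET_KEYWORDS = [
--     'vehicle', 'car', 'truck', 'bus', 'scooter', 'bike',
--     'autonomous vehicle', 'self-driving', 'electric vehicle',
--     'fleet', 'ride-sharing vehicle', 'micromobility',
--     'drone delivery', 'delivery robot'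
-- ]
--
-- INFRA_KEYWORDS = [
--     'infrastructure', 'charging station', 'charging network',
--     'highway', 'rail', 'track', 'station', 'terminal',
--     'parking', 'garage', 'depot', 'hub', 'facility',
--     'hyperloop', 'tunnel', 'bridge', 'port'
-- ]
--
-- # One flat table: keyword -> category label.
-- KEYWORD_LABELS = ([(kw, 'Software') for kw in SOFTWARE_KEYWORDS]
--                   + [(kw, 'Fleet') for kw in FLEET_KEYWORDS]
--                   + [(kw, 'Infrastructure') for kw in INFRA_KEYWORDS])
--
-- # Index the table by first character so each scan position checks few keywords.
-- _BY_FIRST = {}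
-- for kw, label in KEYWORD_LABELS:
--     _BY_FIRST.setdefault(kw[0], []).append((kw, label))
--
--
-- def detect_tech_stack(description: str, keywords: str = '', promise: str = '') -> str:
--     text = f"{description} {keywords} {promise}".lower()
--     # Single position-driven scan: at each offset, record the label of every
--     # keyword that starts there.
--     labels = set()
--     for i, ch in enumerate(text):
--         for kw, label in _BY_FIRST.get(ch, ()):
--             if text.startswith(kw, i):
--                 labels.add(label)
--     if not labels:
--         return 'Unknown'
--     if len(labels) >= 2:
--         return 'Mixed'
--     return labels.pop()
-- ===== Notes on version B (the rewrite author's own statement) =====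
-- stated objective: alternative
-- what changed: Replaces the three per-category substring-count passes and the total/multi-type/priority if-chain by a single position-driven scan of the text: one flat keyword-to-label table is indexed by first character, each text offset checks only the keywords starting with that character via startswith, matched labels are collected into a set, and the answer is read off the set size (empty gives Unknown, two or more gives Mixed, else the sole element).
import Mathlib
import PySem

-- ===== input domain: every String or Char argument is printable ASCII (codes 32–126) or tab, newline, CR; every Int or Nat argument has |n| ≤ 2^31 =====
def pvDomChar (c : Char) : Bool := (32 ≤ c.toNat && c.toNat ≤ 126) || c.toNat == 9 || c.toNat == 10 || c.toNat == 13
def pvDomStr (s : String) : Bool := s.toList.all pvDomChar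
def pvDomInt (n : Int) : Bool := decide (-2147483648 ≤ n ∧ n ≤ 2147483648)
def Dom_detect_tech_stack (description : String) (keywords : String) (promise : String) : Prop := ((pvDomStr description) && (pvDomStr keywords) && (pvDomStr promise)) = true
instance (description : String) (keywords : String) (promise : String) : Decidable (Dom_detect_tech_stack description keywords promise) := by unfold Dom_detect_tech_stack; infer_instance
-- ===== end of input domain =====

-- B replaces A's three per-category substring counts and priority if-chain by a single
-- position-driven scan of the text against one flat keyword→label table, collecting the
-- set of matched labels (objective: alternative).

-- ===== PORT A =====
def pvSoftwareKeywords : List String :=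
  ["saas", "software", "app", "application", "platform",
   "api", "cloud", "algorithm", "ai", "machine learning",
   "data analytics", "routing", "optimization software",
   "mobile app", "web platform", "ota update"]

def pvFleetKeywords : List String :=
  ["vehicle", "car", "truck", "bus", "scooter", "bike",
   "autonomous vehicle", "self-driving", "electric vehicle",
   "fleet", "ride-sharing vehicle", "micromobility",
   "drone delivery", "delivery robot"]

def pvInfraKeywords : List String :=
  ["infrastructure", "charging station", "charging network",
   "highway", "rail", "track", "station", "terminal",
   "parking", "garage", "depot", "hub", "facility",
   "hyperloop", "tunnel", "bridge", "port"]

def detect_tech_stack (description : String) (keywords : String) (promise : String) : String :=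
  let text : List Char :=
    PySem.Chars.lower (description.toList ++ [' '] ++ keywords.toList ++ [' '] ++ promise.toList)
  -- sum(1 for kw in kws if kw in text)
  let software_count : Int := (pvSoftwareKeywords.countP (fun kw => PySem.Chars.isIn kw.toList text) : Int)
  let fleet_count : Int := (pvFleetKeywords.countP (fun kw => PySem.Chars.isIn kw.toList text) : Int)
  let infra_count : Int := (pvInfraKeywords.countP (fun kw => PySem.Chars.isIn kw.toList text) : Int)
  let total : Int := software_count + fleet_count + infra_count
  if total = 0 then "Unknown"
  else if ((if software_count > 0 then (1 : Int) else 0) +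
           (if fleet_count > 0 then (1 : Int) else 0) +
           (if infra_count > 0 then (1 : Int) else 0)) ≥ 2 then "Mixed"
  else if infra_count > 0 then "Infrastructure"
  else if fleet_count > 0 then "Fleet"
  else if software_count > 0 then "Software"
  else "Unknown"

-- ===== PORT B =====
-- KEYWORD_LABELS: one flat keyword → label table
def pvKeywordLabels : List (String × String) :=
  pvSoftwareKeywords.map (fun kw => (kw, "Software")) ++
  pvFleetKeywords.map (fun kw => (kw, "Fleet")) ++
  pvInfraKeywords.map (fun kw => (kw, "Infrastructure"))

-- _BY_FIRST: the table indexed by first character (kw[0]; every keyword is nonempty)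
def pvByFirst : PySem.Dict Char (List (String × String)) :=
  (pvKeywordLabels.map (fun p => (p.1.toList.headD ' ', p))).foldl
    (fun d q => d.modify q.1 [] (· ++ [q.2])) PySem.Dict.empty

def detect_tech_stack_alt (description : String) (keywords : String) (promise : String) : String :=
  let text : List Char :=
    PySem.Chars.lower (description.toList ++ [' '] ++ keywords.toList ++ [' '] ++ promise.toList)
  -- for i, ch in enumerate(text): for kw, label in _BY_FIRST.get(ch, ()): if text.startswith(kw, i): labels.add(label)
  -- text.startswith(kw, i) with 0 ≤ i is exactly: kw is a prefix of text[i:]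
  let labels : PySem.Set String :=
    (PySem.List.enumerate text 0).foldl (fun acc e =>
      (pvByFirst.getD e.2 []).foldl (fun acc2 p =>
        if PySem.Chars.startswith (text.drop e.1.toNat) p.1.toList then PySem.Set.add acc2 p.2
        else acc2) acc)
      PySem.Set.empty
  if labels.length = 0 then "Unknown"
  else if 2 ≤ labels.length then "Mixed"
  else labels.headD ""   -- labels.pop() on a singleton set

-- ===== PRECONDITION & SPEC =====
def Spec_detect_tech_stack (description : String) (keywords : String) (promise : String) (out : String) : Prop := out = detect_tech_stack_alt description keywords promise
instance (description : String) (keywords : String) (promise : String) (out : String) : Decidable (Spec_detect_tech_stack description keywords promise out) := by unfold Spec_detect_tech_stack; infer_instance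

-- ===== CLAIM (what is proved, stated in full; the proofs are below) =====
def Claim_equal_detect_tech_stack : Prop := ∀ (description : String) (keywords : String) (promise : String), Dom_detect_tech_stack description keywords promise → Spec_detect_tech_stack description keywords promise (detect_tech_stack description keywords promise)

-- ===== LEMMAS AND PROOFS =====

-- membership in the inner per-position loop (conditional Set.add over the keyword table)
theorem mem_inner_fold (l : List (String × String)) (c : String × String → Bool)
    (acc : PySem.Set String) (x : String) :
    (x ∈ l.foldl (fun s p => if c p then PySem.Set.add s p.2 else s) acc) ↔
      x ∈ acc ∨ ∃ p ∈ l, c p = true ∧ x = p.2 := by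
  induction l generalizing acc with
  | nil => simp
  | cons p l ih =>
    simp only [List.foldl_cons, List.mem_cons]
    by_cases h : c p = true
    · simp only [h, if_true, ih, PySem.Set.mem_add]
      constructor
      · rintro ((h' | hx) | ⟨q, hq, hc, hx⟩)
        · exact Or.inl h'
        · exact Or.inr ⟨p, Or.inl rfl, h, hx⟩
        · exact Or.inr ⟨q, Or.inr hq, hc, hx⟩
      · rintro (h' | ⟨q, (rfl | hq), hc, hx⟩)
        · exact Or.inl (Or.inl h')
        · exact Or.inl (Or.inr hx)
        · exact Or.inr ⟨q, hq, hc, hx⟩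
    · simp only [h, if_false, ih, Bool.false_eq_true]
      constructor
      · rintro (h' | ⟨q, hq, hc, hx⟩)
        · exact Or.inl h'
        · exact Or.inr ⟨q, Or.inr hq, hc, hx⟩
      · rintro (h' | ⟨q, (rfl | hq), hc, hx⟩)
        · exact Or.inl h'
        · exact absurd hc h
        · exact Or.inr ⟨q, hq, hc, hx⟩

theorem nodup_inner_fold (l : List (String × String)) (c : String × String → Bool)
    (acc : PySem.Set String) (h : acc.Nodup) :
    (l.foldl (fun s p => if c p then PySem.Set.add s p.2 else s) acc).Nodup := by
  induction l generalizing acc with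
  | nil => simpa
  | cons p l ih =>
    simp only [List.foldl_cons]
    apply ih
    split
    · exact PySem.Set.nodup_add _ _ h
    · exact h

theorem mem_outer_fold (r : List (Int × Char)) (t : List Char) (acc : PySem.Set String) (x : String) :
    (x ∈ r.foldl (fun acc e =>
        (pvByFirst.getD e.2 []).foldl (fun acc2 p =>
          if PySem.Chars.startswith (t.drop e.1.toNat) p.1.toList then PySem.Set.add acc2 p.2
          else acc2) acc) acc) ↔
      x ∈ acc ∨ ∃ e ∈ r, ∃ p ∈ pvByFirst.getD e.2 [],
        PySem.Chars.startswith (t.drop e.1.toNat) p.1.toList = true ∧ x = p.2 := by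
  induction r generalizing acc with
  | nil => simp
  | cons i r ih =>
    simp only [List.foldl_cons, List.mem_cons, ih, mem_inner_fold]
    constructor
    · rintro ((h | ⟨p, hp, hsw, hx⟩) | ⟨i', hi', rest⟩)
      · exact Or.inl h
      · exact Or.inr ⟨i, Or.inl rfl, p, hp, hsw, hx⟩
      · exact Or.inr ⟨i', Or.inr hi', rest⟩
    · rintro (h | ⟨i', hi' | hi', rest⟩)
      · exact Or.inl (Or.inl h)
      · subst hi'; exact Or.inl (Or.inr rest)
      · exact Or.inr ⟨i', hi', rest⟩

theorem nodup_outer_fold (r : List (Int × Char)) (t : List Char) (acc : PySem.Set String) (h : acc.Nodup) :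
    (r.foldl (fun acc e =>
        (pvByFirst.getD e.2 []).foldl (fun acc2 p =>
          if PySem.Chars.startswith (t.drop e.1.toNat) p.1.toList then PySem.Set.add acc2 p.2
          else acc2) acc) acc).Nodup := by
  induction r generalizing acc with
  | nil => simpa
  | cons i r ih =>
    simp only [List.foldl_cons]
    exact ih _ (nodup_inner_fold _ _ _ h)

-- the first-character index groups exactly the keywords with that first character
theorem mem_byFirst (c : Char) (p : String × String) :
    p ∈ pvByFirst.getD c [] ↔ p ∈ pvKeywordLabels ∧ p.1.toList.headD ' ' = c := by
  unfold pvByFirst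
  rw [PySem.Dict.getD_foldl_modify_append]
  simp [PySem.Dict.empty, PySem.Dict.getD, PySem.Dict.get?]
  constructor
  · rintro ⟨a, b, hmem, hh, rfl⟩
    exact ⟨hmem, hh⟩
  · rintro ⟨hmem, hh⟩
    exact ⟨p.1, p.2, hmem, hh, rfl⟩

-- every keyword in the table is nonempty
theorem kw_nonempty : ∀ p ∈ pvKeywordLabels, p.1.toList ≠ [] := by decide

-- countP facts on the A side
theorem countP_int_eq_zero_of_any_false {l : List String} {p : String → Bool}
    (h : l.any p = false) : (l.countP p : Int) = 0 := by
  have : l.countP p = 0 := by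
    rw [List.countP_eq_zero]
    intro a ha
    exact Bool.eq_false_iff.mp (by simpa using (List.any_eq_false.mp h) a ha)
  simp [this]

theorem countP_int_pos_of_any_true {l : List String} {p : String → Bool}
    (h : l.any p = true) : (0 : Int) < (l.countP p : Int) := by
  rcases List.any_eq_true.mp h with ⟨a, ha, hpa⟩
  exact_mod_cast List.countP_pos_iff.mpr ⟨a, ha, hpa⟩

-- a Nodup list whose members are exactly {v} is [v]
theorem eq_singleton_of_nodup (l : List String) (v : String) (hnd : l.Nodup)
    (hmem : v ∈ l) (hall : ∀ x ∈ l, x = v) : l = [v] := by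
  cases l with
  | nil => cases hmem
  | cons a l =>
    have ha : a = v := hall a (by simp)
    subst ha
    have : l = [] := by
      rcases List.eq_nil_or_concat l with h | ⟨l', b, rfl⟩
      · exact h
      · exfalso
        have hb : b = a := hall b (by simp)
        subst hb
        exact (List.nodup_cons.mp hnd).1 (by simp)
    simp [this]

-- two distinct members force length ≥ 2
theorem two_le_length_of_two_mem (l : List String) (a b : String) (ha : a ∈ l) (hb : b ∈ l)
    (hab : a ≠ b) : 2 ≤ l.length := by
  have h2 : ({a, b} : Finset String).card ≤ l.toFinset.card := by
    apply Finset.card_le_card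
    intro x hx
    simp only [Finset.mem_insert, Finset.mem_singleton] at hx
    rcases hx with rfl | rfl <;> simp [List.mem_toFinset, ha, hb]
  have hcard : ({a, b} : Finset String).card = 2 := Finset.card_pair hab
  calc 2 = ({a, b} : Finset String).card := hcard.symm
    _ ≤ l.toFinset.card := h2
    _ ≤ l.length := l.toFinset_card_le

-- membership in B's label set ↔ some keyword of the category occurs in the text
theorem mem_labels_iff (t : List Char) (x : String) :
    (x ∈ (PySem.List.enumerate t 0).foldl (fun acc e =>
        (pvByFirst.getD e.2 []).foldl (fun acc2 p =>
          if PySem.Chars.startswith (t.drop e.1.toNat) p.1.toList then PySem.Set.add acc2 p.2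
          else acc2) acc) PySem.Set.empty) ↔
      ∃ p ∈ pvKeywordLabels, PySem.Chars.isIn p.1.toList t = true ∧ x = p.2 := by
  rw [mem_outer_fold]
  constructor
  · rintro (h | ⟨e, _, p, hp, hs, rfl⟩)
    · simp [PySem.Set.empty] at h
    · exact ⟨p, ((mem_byFirst _ _).mp hp).1,
        (PySem.Chars.exists_prefix_drop_iff_isIn ..).mp
          ⟨e.1.toNat, (PySem.Chars.startswith_iff ..).mp hs⟩, rfl⟩
  · rintro ⟨p, hp, hin, rfl⟩
    obtain ⟨j, hj⟩ := (PySem.Chars.exists_prefix_drop_iff_isIn ..).mpr hin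
    have hnil := kw_nonempty p hp
    obtain ⟨c, rest, hkw⟩ : ∃ c rest, p.1.toList = c :: rest := by
      cases h : p.1.toList with
      | nil => exact absurd h hnil
      | cons c rest => exact ⟨c, rest, rfl⟩
    have hjlt : j < t.length := by
      by_contra hge
      rw [List.drop_eq_nil_of_le (by omega)] at hj
      exact hnil (List.prefix_nil.mp hj)
    have hhead : (t.drop j).head? = some c := by
      obtain ⟨u, hu⟩ := hj
      rw [← hu, hkw]; rfl
    have htj : t[j] = c := by
      rw [List.head?_drop, List.getElem?_eq_getElem hjlt] at hhead
      exact Option.some.inj hhead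
    refine Or.inr ⟨((j : Int), t[j]), ?_, p, ?_, ?_, rfl⟩
    · rw [PySem.List.mem_enumerate_iff]
      exact ⟨j, hjlt, by simp⟩
    · rw [mem_byFirst]
      exact ⟨hp, by rw [hkw, htj]; rfl⟩
    · simp only [Int.toNat_natCast]
      exact (PySem.Chars.startswith_iff ..).mpr hj

-- ===== VERDICT (by name: the statement is the Claim_ definition above) =====
theorem detect_tech_stack_spec : Claim_equal_detect_tech_stack := by
  intro description keywords promise _
  unfold Spec_detect_tech_stack detect_tech_stack detect_tech_stack_alt
  generalize PySem.Chars.lower (description.toList ++ [' '] ++ keywords.toList ++ [' '] ++ promise.toList) = t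
  dsimp only
  set L := (PySem.List.enumerate t 0).foldl (fun acc e =>
      (pvByFirst.getD e.2 []).foldl (fun acc2 p =>
        if PySem.Chars.startswith (t.drop e.1.toNat) p.1.toList then PySem.Set.add acc2 p.2
        else acc2) acc) PySem.Set.empty with hL
  have hnd : L.Nodup := nodup_outer_fold _ _ _ (by simp [PySem.Set.empty])
  have hmem : ∀ x, x ∈ L ↔
      (pvSoftwareKeywords.any (fun kw => PySem.Chars.isIn kw.toList t) = true ∧ x = "Software") ∨
      (pvFleetKeywords.any (fun kw => PySem.Chars.isIn kw.toList t) = true ∧ x = "Fleet") ∨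
      (pvInfraKeywords.any (fun kw => PySem.Chars.isIn kw.toList t) = true ∧ x = "Infrastructure") := by
    intro x
    rw [hL, mem_labels_iff]
    simp only [pvKeywordLabels, List.mem_append, List.mem_map, List.any_eq_true]
    constructor
    · rintro ⟨p, (⟨kw, hkw, rfl⟩ | ⟨kw, hkw, rfl⟩) | ⟨kw, hkw, rfl⟩, hin, rfl⟩
      · exact Or.inl ⟨⟨kw, hkw, hin⟩, rfl⟩
      · exact Or.inr (Or.inl ⟨⟨kw, hkw, hin⟩, rfl⟩)
      · exact Or.inr (Or.inr ⟨⟨kw, hkw, hin⟩, rfl⟩)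
    · rintro (⟨⟨kw, hkw, hin⟩, rfl⟩ | ⟨⟨kw, hkw, hin⟩, rfl⟩ | ⟨⟨kw, hkw, hin⟩, rfl⟩)
      · exact ⟨(kw, "Software"), Or.inl (Or.inl ⟨kw, hkw, rfl⟩), hin, rfl⟩
      · exact ⟨(kw, "Fleet"), Or.inl (Or.inr ⟨kw, hkw, rfl⟩), hin, rfl⟩
      · exact ⟨(kw, "Infrastructure"), Or.inr ⟨kw, hkw, rfl⟩, hin, rfl⟩
  cases hs : pvSoftwareKeywords.any (fun kw => PySem.Chars.isIn kw.toList t) <;>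
  cases hf : pvFleetKeywords.any (fun kw => PySem.Chars.isIn kw.toList t) <;>
  cases hi : pvInfraKeywords.any (fun kw => PySem.Chars.isIn kw.toList t)
  all_goals simp only [hs, hf, hi] at hmem
  -- case FFF: no matches
  · have hLnil : L = [] := List.eq_nil_iff_forall_not_mem.mpr (by intro x hx; simpa using (hmem x).mp hx)
    have Hs := countP_int_eq_zero_of_any_false hs
    have Hf := countP_int_eq_zero_of_any_false hf
    have Hi := countP_int_eq_zero_of_any_false hi
    rw [hLnil]
    simp only [List.length_nil]
    split_ifs <;> first | rfl | omega
  -- case FFT: infra only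
  · have hLI : L = ["Infrastructure"] :=
      eq_singleton_of_nodup L _ hnd ((hmem _).mpr (by simp)) (by intro x hx; have := (hmem x).mp hx; tauto)
    have Hs := countP_int_eq_zero_of_any_false hs
    have Hf := countP_int_eq_zero_of_any_false hf
    have Hi := countP_int_pos_of_any_true hi
    rw [hLI]
    simp only [List.length_cons, List.length_nil]
    split_ifs <;> first | rfl | omega | exact False.elim ‹False›
  -- case FTF: fleet only
  · have hLI : L = ["Fleet"] :=
      eq_singleton_of_nodup L _ hnd ((hmem _).mpr (by simp)) (by intro x hx; have := (hmem x).mp hx; tauto)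
    have Hs := countP_int_eq_zero_of_any_false hs
    have Hf := countP_int_pos_of_any_true hf
    have Hi := countP_int_eq_zero_of_any_false hi
    rw [hLI]
    simp only [List.length_cons, List.length_nil]
    split_ifs <;> first | rfl | omega | exact False.elim ‹False›
  -- case FTT: fleet + infra
  · have h2 : 2 ≤ L.length :=
      two_le_length_of_two_mem L "Fleet" "Infrastructure"
        ((hmem _).mpr (by simp)) ((hmem _).mpr (by simp)) (by decide)
    have Hs := countP_int_eq_zero_of_any_false hs
    have Hf := countP_int_pos_of_any_true hf
    have Hi := countP_int_pos_of_any_true hi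
    split_ifs <;> first | rfl | omega
  -- case TFF: software only
  · have hLI : L = ["Software"] :=
      eq_singleton_of_nodup L _ hnd ((hmem _).mpr (by simp)) (by intro x hx; have := (hmem x).mp hx; tauto)
    have Hs := countP_int_pos_of_any_true hs
    have Hf := countP_int_eq_zero_of_any_false hf
    have Hi := countP_int_eq_zero_of_any_false hi
    rw [hLI]
    simp only [List.length_cons, List.length_nil]
    split_ifs <;> first | rfl | omega | exact False.elim ‹False›
  -- case TFT: software + infra
  · have h2 : 2 ≤ L.length :=
      two_le_length_of_two_mem L "Software" "Infrastructure"
        ((hmem _).mpr (by simp)) ((hmem _).mpr (by simp)) (by decide)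
    have Hs := countP_int_pos_of_any_true hs
    have Hf := countP_int_eq_zero_of_any_false hf
    have Hi := countP_int_pos_of_any_true hi
    split_ifs <;> first | rfl | omega
  -- case TTF: software + fleet
  · have h2 : 2 ≤ L.length :=
      two_le_length_of_two_mem L "Software" "Fleet"
        ((hmem _).mpr (by simp)) ((hmem _).mpr (by simp)) (by decide)
    have Hs := countP_int_pos_of_any_true hs
    have Hf := countP_int_pos_of_any_true hf
    have Hi := countP_int_eq_zero_of_any_false hi
    split_ifs <;> first | rfl | omega
  -- case TTT: all three
  · have h2 : 2 ≤ L.length :=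
      two_le_length_of_two_mem L "Software" "Fleet"
        ((hmem _).mpr (by simp)) ((hmem _).mpr (by simp)) (by decide)
    have Hs := countP_int_pos_of_any_true hs
    have Hf := countP_int_pos_of_any_true hf
    have Hi := countP_int_pos_of_any_true hi
    split_ifs <;> first | rfl | omega
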